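-- pv_equiv track=rewrite | github.com/ChrAtt1/Sequencing_Data_Analysis_Framework | 2_genotype_analyzer/step_3_analyse_file.py | sort_excel_sheets
-- ===== SOURCE A (Python) =====
-- def sort_excel_sheets(sheet_names):
--     # Separate main sheets and haplotypes by methods sheets
--     main_sheets = [name for name in sheet_names if not name.endswith('_by_methods')]
--     haplotype_sheets = [name for name in sheet_names if name.endswith('_haplotypes_by_methods')]
--     allele_sheets = [name for name in sheet_names if name.endswith('_alleles_by_methods')]
--
--     # Sort both lists individually
--     main_sheets.sort()
--     haplotype_sheets.sort()
--     allele_sheets.sort()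
--
--     # Combine the sorted lists
--     sorted_sheets = main_sheets + haplotype_sheets + allele_sheets
--
--     return sorted_sheets
-- ===== SOURCE B (Python) =====
-- def sort_excel_sheets(sheet_names):
--     # single classifying pass instead of three filter scans
--     main_sheets = []
--     haplotype_sheets = []
--     allele_sheets = []
--     for name in sheet_names:
--         if not name.endswith('_by_methods'):
--             main_sheets.append(name)
--         elif name.endswith('_haplotypes_by_methods'):
--             haplotype_sheets.append(name)
--         elif name.endswith('_alleles_by_methods'):
--             allele_sheets.append(name)
--         # other '_by_methods' names are dropped, as in the original
--     main_sheets.sort()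
--     haplotype_sheets.sort()
--     allele_sheets.sort()
--     return main_sheets + haplotype_sheets + allele_sheets
-- ===== Notes on version B (the rewrite author's own statement) =====
-- stated objective: alternative
-- what changed: Replaced A's three separate filter comprehensions (three full scans of sheet_names) by one classifying pass with an if/elif chain that appends each name to its main/haplotype/allele bucket (dropping unmatched '_by_methods' names), then sorts and concatenates the buckets.
import Mathlib
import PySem

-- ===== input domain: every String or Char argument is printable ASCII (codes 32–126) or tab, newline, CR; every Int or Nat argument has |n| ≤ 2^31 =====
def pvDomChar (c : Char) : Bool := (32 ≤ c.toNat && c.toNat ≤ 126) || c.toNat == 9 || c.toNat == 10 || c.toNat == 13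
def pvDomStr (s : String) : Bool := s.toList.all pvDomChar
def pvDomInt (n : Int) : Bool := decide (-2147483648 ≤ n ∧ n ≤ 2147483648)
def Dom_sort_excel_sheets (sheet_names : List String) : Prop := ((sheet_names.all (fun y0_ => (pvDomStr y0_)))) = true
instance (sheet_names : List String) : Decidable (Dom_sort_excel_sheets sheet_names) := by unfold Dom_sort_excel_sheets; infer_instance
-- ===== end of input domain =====

-- B replaces A's three filter scans by one classifying pass (if/elif buckets); same return value.

-- ===== PORT A =====
def sort_excel_sheets (sheet_names : List String) : List String :=
  let main_sheets := sheet_names.filter (fun name => !(PySem.Str.endswith name "_by_methods"))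
  let haplotype_sheets := sheet_names.filter (fun name => PySem.Str.endswith name "_haplotypes_by_methods")
  let allele_sheets := sheet_names.filter (fun name => PySem.Str.endswith name "_alleles_by_methods")
  PySem.List.sorted main_sheets (fun x => x) ++
    PySem.List.sorted haplotype_sheets (fun x => x) ++
    PySem.List.sorted allele_sheets (fun x => x)

-- ===== PORT B =====
def pvClassify (acc : List String × List String × List String) (name : String) :
    List String × List String × List String :=
  if !(PySem.Str.endswith name "_by_methods") then (acc.1 ++ [name], acc.2.1, acc.2.2)
  else if PySem.Str.endswith name "_haplotypes_by_methods" then (acc.1, acc.2.1 ++ [name], acc.2.2)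
  else if PySem.Str.endswith name "_alleles_by_methods" then (acc.1, acc.2.1, acc.2.2 ++ [name])
  else acc

def sort_excel_sheets_alt (sheet_names : List String) : List String :=
  let buckets := sheet_names.foldl pvClassify ([], [], [])
  PySem.List.sorted buckets.1 (fun x => x) ++
    PySem.List.sorted buckets.2.1 (fun x => x) ++
    PySem.List.sorted buckets.2.2 (fun x => x)

-- ===== PRECONDITION & SPEC =====
def Spec_sort_excel_sheets (sheet_names : List String) (out : List String) : Prop := out = sort_excel_sheets_alt sheet_names
instance (sheet_names : List String) (out : List String) : Decidable (Spec_sort_excel_sheets sheet_names out) := by unfold Spec_sort_excel_sheets; infer_instance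

-- ===== CLAIM (what is proved, stated in full; the proofs are below) =====
def Claim_equal_sort_excel_sheets : Prop := ∀ (sheet_names : List String), Dom_sort_excel_sheets sheet_names → Spec_sort_excel_sheets sheet_names (sort_excel_sheets sheet_names)

-- ===== LEMMAS AND PROOFS =====

-- '…_haplotypes_by_methods' ends with '_by_methods'
theorem hap_imp_bm (s : String) (h : PySem.Str.endswith s "_haplotypes_by_methods" = true) :
    PySem.Str.endswith s "_by_methods" = true := by
  simp only [PySem.Str.endswith_eq, PySem.Chars.endswith_iff] at h ⊢
  exact List.IsSuffix.trans (by decide) h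

-- '…_alleles_by_methods' ends with '_by_methods'
theorem all_imp_bm (s : String) (h : PySem.Str.endswith s "_alleles_by_methods" = true) :
    PySem.Str.endswith s "_by_methods" = true := by
  simp only [PySem.Str.endswith_eq, PySem.Chars.endswith_iff] at h ⊢
  exact List.IsSuffix.trans (by decide) h

-- a name cannot end with both '_haplotypes_by_methods' and '_alleles_by_methods'
theorem hap_imp_not_all (s : String) (h : PySem.Str.endswith s "_haplotypes_by_methods" = true) :
    PySem.Str.endswith s "_alleles_by_methods" = false := by
  by_contra hc
  rw [Bool.not_eq_false] at hc
  simp only [PySem.Str.endswith_eq, PySem.Chars.endswith_iff] at h hc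
  have := List.suffix_of_suffix_length_le hc h (by decide)
  revert this; decide

theorem fold_buckets (xs : List String) (m h a : List String) :
    xs.foldl pvClassify (m, h, a) =
      (m ++ xs.filter (fun name => !(PySem.Str.endswith name "_by_methods")),
       h ++ xs.filter (fun name => PySem.Str.endswith name "_haplotypes_by_methods"),
       a ++ xs.filter (fun name => PySem.Str.endswith name "_alleles_by_methods")) := by
  induction xs generalizing m h a with
  | nil => simp
  | cons x xs ih =>
    simp only [List.foldl_cons, List.filter_cons]
    cases hbm : PySem.Str.endswith x "_by_methods" with
    | false =>
      have hhap : PySem.Str.endswith x "_haplotypes_by_methods" = false := by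
        cases hc : PySem.Str.endswith x "_haplotypes_by_methods"
        · rfl
        · rw [hap_imp_bm x hc] at hbm; exact hbm
      have hall : PySem.Str.endswith x "_alleles_by_methods" = false := by
        cases hc : PySem.Str.endswith x "_alleles_by_methods"
        · rfl
        · rw [all_imp_bm x hc] at hbm; exact hbm
      simp only [pvClassify, hbm, hhap, hall]
      simp [ih]
    | true =>
      cases hhap : PySem.Str.endswith x "_haplotypes_by_methods" with
      | true =>
        have hall := hap_imp_not_all x hhap
        simp only [pvClassify, hbm, hhap, hall]
        simp [ih]
      | false =>
        cases hall : PySem.Str.endswith x "_alleles_by_methods" with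
        | true =>
          simp only [pvClassify, hbm, hhap, hall]
          simp [ih]
        | false =>
          simp only [pvClassify, hbm, hhap, hall]
          simp [ih]

-- ===== VERDICT (by name: the statement is the Claim_ definition above) =====
theorem sort_excel_sheets_spec : Claim_equal_sort_excel_sheets := by
  intro sheet_names _
  unfold Spec_sort_excel_sheets sort_excel_sheets sort_excel_sheets_alt
  rw [fold_buckets sheet_names [] [] []]
  simp
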